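-- pv_equiv track=rewrite | github.com/pro99d/chess | main.py | add_pieces
-- ===== SOURCE A (Python) =====
-- def add_pieces(board: str):
--     pieces = {
--         "K": "♔", "Q": "♕", "R": "♖", "B": "♗", "N": "♘", "P": "♙",
--         "k": "♚", "q": "♛", "r": "♜", "b": "♝", "n": "♞", "p": "♟"
--     }
--     for key, value in pieces.items():
--         board = board.replace(key, value)  # Reassign modified string
--     return board
-- ===== SOURCE B (Python) =====
-- def add_pieces(board: str):
--     letters = "KQRBNPkqrbnp"
--     glyphs = "\u2654\u2655\u2656\u2657\u2658\u2659\u265a\u265b\u265c\u265d\u265e\u265f"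
--     out = []
--     for c in board:
--         i = letters.find(c)
--         out.append(glyphs[i] if i >= 0 else c)
--     return "".join(out)
-- ===== Notes on version B (the rewrite author's own statement) =====
-- stated objective: alternative
-- what changed: B drops the dict and the 12 full-string replace passes: it makes a single pass over the board's characters, locating each in a parallel letters string with find and picking the glyph at the same index (non-letters pass through).
import Mathlib
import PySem

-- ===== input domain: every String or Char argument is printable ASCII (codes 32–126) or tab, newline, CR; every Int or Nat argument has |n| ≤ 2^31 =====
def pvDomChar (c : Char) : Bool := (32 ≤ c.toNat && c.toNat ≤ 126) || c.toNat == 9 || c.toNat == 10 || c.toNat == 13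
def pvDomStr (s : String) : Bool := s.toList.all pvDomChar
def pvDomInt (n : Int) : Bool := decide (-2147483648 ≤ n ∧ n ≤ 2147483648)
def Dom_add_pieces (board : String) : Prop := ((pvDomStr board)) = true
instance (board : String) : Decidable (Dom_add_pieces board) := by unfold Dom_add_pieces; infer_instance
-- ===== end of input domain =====

-- B replaces A's dict of 12 successive full-string replace() scans by a single pass
-- over the board's characters, finding each in a parallel letters string and taking
-- the glyph at the same index (same return value; no speed claim).

-- ===== PORT A =====
def pvPiecesA : PySem.Dict String String := PySem.Dict.ofList
  [("K", "♔"), ("Q", "♕"), ("R", "♖"), ("B", "♗"), ("N", "♘"), ("P", "♙"),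
   ("k", "♚"), ("q", "♛"), ("r", "♜"), ("b", "♝"), ("n", "♞"), ("p", "♟")]

def add_pieces (board : String) : String :=
  pvPiecesA.items.foldl (fun b kv => PySem.Str.replace b kv.1 kv.2) board

-- ===== PORT B =====
def pvLetters : List Char := "KQRBNPkqrbnp".toList
def pvGlyphs : List Char := "♔♕♖♗♘♙♚♛♜♝♞♟".toList

def add_pieces_alt (board : String) : String :=
  String.ofList (board.toList.foldl (fun out c =>
    let i := PySem.Chars.find pvLetters [c]
    out ++ [if 0 ≤ i then PySem.List.pyGetD pvGlyphs i c else c]) [])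

-- ===== PRECONDITION & SPEC =====
def Spec_add_pieces (board : String) (out : String) : Prop := out = add_pieces_alt board
instance (board : String) (out : String) : Decidable (Spec_add_pieces board out) := by unfold Spec_add_pieces; infer_instance

-- ===== CLAIM (what is proved, stated in full; the proofs are below) =====
def Claim_equal_add_pieces : Prop := ∀ (board : String), Dom_add_pieces board → Spec_add_pieces board (add_pieces board)

-- ===== LEMMAS AND PROOFS =====

-- single-character substitution, and A's twelve substitutions composed
def pvStep (k v : Char) : Char → Char := fun c => if c = k then v else c
def pvSub : Char → Char :=
  pvStep 'p' '♟' ∘ pvStep 'n' '♞' ∘ pvStep 'b' '♝' ∘ pvStep 'r' '♜' ∘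
  pvStep 'q' '♛' ∘ pvStep 'k' '♚' ∘ pvStep 'P' '♙' ∘ pvStep 'N' '♘' ∘
  pvStep 'B' '♗' ∘ pvStep 'R' '♖' ∘ pvStep 'Q' '♕' ∘ pvStep 'K' '♔'

-- replace with a single-char pattern and single-char replacement is a charwise map
theorem replace_go_single (k v : Char) (l acc : List Char) (fuel : Nat)
    (h : l.length ≤ fuel) :
    PySem.Chars.replace.go [k] [v] fuel l acc
      = acc.reverse ++ l.map (fun c => if c = k then v else c) := by
  induction l generalizing fuel acc with
  | nil =>
    cases fuel <;> simp [PySem.Chars.replace.go]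
  | cons c t ih =>
    cases fuel with
    | zero => simp at h
    | succ n =>
      rw [PySem.Chars.replace.go]
      by_cases hc : c = k
      · subst hc
        rw [if_pos (by simp [List.isPrefixOf])]
        simp only [List.length_cons, List.drop_succ_cons, List.length_nil, List.drop_zero]
        rw [ih _ _ (by simpa using h)]
        simp
      · rw [if_neg (by simp [List.isPrefixOf]; exact fun h' => (hc h'.symm).elim)]
        rw [ih _ _ (by simpa using h)]
        simp [hc]

theorem replace_single (k v : Char) (s : List Char) :
    PySem.Chars.replace s [k] [v] = s.map (pvStep k v) := by
  simp [PySem.Chars.replace, pvStep, replace_go_single k v s [] s.length le_rfl]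

-- the character B's find-and-index step produces equals A's composed substitution
theorem pointwise (c : Char) :
    (let i := PySem.Chars.find pvLetters [c]
     if 0 ≤ i then PySem.List.pyGetD pvGlyphs i c else c) = pvSub c := by
  by_cases h1 : c = 'K'
  · subst h1; decide
  by_cases h2 : c = 'Q'
  · subst h2; decide
  by_cases h3 : c = 'R'
  · subst h3; decide
  by_cases h4 : c = 'B'
  · subst h4; decide
  by_cases h5 : c = 'N'
  · subst h5; decide
  by_cases h6 : c = 'P'
  · subst h6; decide
  by_cases h7 : c = 'k'
  · subst h7; decide
  by_cases h8 : c = 'q'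
  · subst h8; decide
  by_cases h9 : c = 'r'
  · subst h9; decide
  by_cases h10 : c = 'b'
  · subst h10; decide
  by_cases h11 : c = 'n'
  · subst h11; decide
  by_cases h12 : c = 'p'
  · subst h12; decide
  have hmem : c ∉ pvLetters := by
    simp [pvLetters, h1, h2, h3, h4, h5, h6, h7, h8, h9, h10, h11, h12]
  have hfind : PySem.Chars.find pvLetters [c] = -1 := by
    rw [PySem.Chars.find_eq_neg_one_iff]
    rw [List.singleton_infix_iff]
    exact hmem
  simp only [hfind]
  rw [if_neg (by omega)]
  simp [pvSub, pvStep, Function.comp_apply, h1, h2, h3, h4, h5, h6, h7, h8, h9, h10, h11, h12]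

-- ===== VERDICT (by name: the statement is the Claim_ definition above) =====
set_option maxHeartbeats 1600000 in
theorem add_pieces_spec : Claim_equal_add_pieces := by
  intro board _
  unfold Spec_add_pieces add_pieces add_pieces_alt
  rw [show pvPiecesA.items
      = [("K", "♔"), ("Q", "♕"), ("R", "♖"), ("B", "♗"), ("N", "♘"), ("P", "♙"),
         ("k", "♚"), ("q", "♛"), ("r", "♜"), ("b", "♝"), ("n", "♞"), ("p", "♟")] from by decide]
  simp only [List.foldl_cons, List.foldl_nil, PySem.Str.replace, String.toList_ofList]
  simp only [show ("K" : String).toList = ['K'] from rfl, show ("♔" : String).toList = ['♔'] from rfl, show ("Q" : String).toList = ['Q'] from rfl, show ("♕" : String).toList = ['♕'] from rfl, show ("R" : String).toList = ['R'] from rfl, show ("♖" : String).toList = ['♖'] from rfl, show ("B" : String).toList = ['B'] from rfl, show ("♗" : String).toList = ['♗'] from rfl, show ("N" : String).toList = ['N'] from rfl, show ("♘" : String).toList = ['♘'] from rfl, show ("P" : String).toList = ['P'] from rfl, show ("♙" : String).toList = ['♙'] from rfl, show ("k" : String).toList = ['k'] from rfl, show ("♚" : String).toList = ['♚'] from rfl,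 show ("q" : String).toList = ['q'] from rfl, show ("♛" : String).toList = ['♛'] from rfl, show ("r" : String).toList = ['r'] from rfl, show ("♜" : String).toList = ['♜'] from rfl, show ("b" : String).toList = ['b'] from rfl, show ("♝" : String).toList = ['♝'] from rfl, show ("n" : String).toList = ['n'] from rfl, show ("♞" : String).toList = ['♞'] from rfl, show ("p" : String).toList = ['p'] from rfl, show ("♟" : String).toList = ['♟'] from rfl]
  simp only [replace_single]
  rw [PySem.List.foldl_append_singleton_eq_map]
  simp only [pointwise]
  simp only [List.map_map]
  rfl
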